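-- pv_equiv track=rewrite | github.com/fifas3/python | stock_cn/stock_cn/common.py | calculate_benmingnian
-- ===== SOURCE A (Python) =====
-- def calculate_benmingnian(start_year, end_year, birth_year):
--     birth_years = []
--     current_year = start_year
--     while current_year <= end_year:
--         if (current_year - birth_year) % 12 == 0:
--             birth_years.append(current_year)
--         current_year += 1
--     return birth_years
-- ===== SOURCE B (Python) =====
-- def calculate_benmingnian(start_year, end_year, birth_year):
--     first = start_year + (birth_year - start_year) % 12
--     return list(range(first, end_year + 1, 12))
-- ===== Notes on version B (the rewrite author's own statement) =====
-- stated objective: faster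
-- what changed: B jumps directly to the first year >= start_year congruent to birth_year mod 12 and steps by 12 (a range), instead of scanning every year and testing the modulus.
import Mathlib
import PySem

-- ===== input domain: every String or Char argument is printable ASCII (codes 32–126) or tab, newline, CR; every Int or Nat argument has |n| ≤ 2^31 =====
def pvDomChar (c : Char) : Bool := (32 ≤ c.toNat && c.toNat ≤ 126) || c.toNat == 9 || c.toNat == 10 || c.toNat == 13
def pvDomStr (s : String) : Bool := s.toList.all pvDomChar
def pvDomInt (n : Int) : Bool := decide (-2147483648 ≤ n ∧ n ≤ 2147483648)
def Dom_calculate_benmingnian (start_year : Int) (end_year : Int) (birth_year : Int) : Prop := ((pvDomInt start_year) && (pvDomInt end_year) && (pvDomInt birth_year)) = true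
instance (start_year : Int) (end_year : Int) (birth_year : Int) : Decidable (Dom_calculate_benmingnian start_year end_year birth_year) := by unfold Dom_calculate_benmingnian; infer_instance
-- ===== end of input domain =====

-- B replaces A's year-by-year scan with a direct jump to the first congruent year and a step-12 range (faster by a constant factor).

-- ===== PORT A =====
-- the while loop of A: scan current_year upward, appending matching years
def calcLoopA (end_year birth_year : Int) (current_year : Int) (acc : List Int) : List Int :=
  if current_year ≤ end_year then
    calcLoopA end_year birth_year (current_year + 1)
      (if PySem.Int.mod (current_year - birth_year) 12 = 0 then acc ++ [current_year] else acc)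
  else acc
termination_by (end_year + 1 - current_year).toNat
decreasing_by omega

def calculate_benmingnian (start_year : Int) (end_year : Int) (birth_year : Int) : List Int :=
  calcLoopA end_year birth_year start_year []

-- ===== PORT B =====
def calculate_benmingnian_alt (start_year : Int) (end_year : Int) (birth_year : Int) : List Int :=
  PySem.List.pyRange (start_year + PySem.Int.mod (birth_year - start_year) 12) (end_year + 1) 12

-- ===== PRECONDITION & SPEC =====
def Spec_calculate_benmingnian (start_year : Int) (end_year : Int) (birth_year : Int) (out : List Int) : Prop := out = calculate_benmingnian_alt start_year end_year birth_year
instance (start_year : Int) (end_year : Int) (birth_year : Int) (out : List Int) : Decidable (Spec_calculate_benmingnian start_year end_year birth_year out) := by unfold Spec_calculate_benmingnian; infer_instance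

-- ===== CLAIM (what is proved, stated in full; the proofs are below) =====
def Claim_equal_calculate_benmingnian : Prop := ∀ (start_year : Int) (end_year : Int) (birth_year : Int), Dom_calculate_benmingnian start_year end_year birth_year → Spec_calculate_benmingnian start_year end_year birth_year (calculate_benmingnian start_year end_year birth_year)

-- ===== LEMMAS AND PROOFS =====

theorem pymod_eq_emod (x : Int) : PySem.Int.mod x 12 = x % 12 := by
  simp [PySem.Int.mod, Int.fmod_eq_emod]

theorem pyRange12_nil {a b : Int} (h : b ≤ a) : PySem.List.pyRange a b 12 = [] := by
  rw [PySem.List.pyRange_of_pos a b (by norm_num)]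
  rw [if_neg (by omega)]
  simp

theorem pyRange12_cons {a b : Int} (h : a < b) :
    PySem.List.pyRange a b 12 = a :: PySem.List.pyRange (a + 12) b 12 := by
  rw [PySem.List.pyRange_of_pos a b (by norm_num),
      PySem.List.pyRange_of_pos (a + 12) b (by norm_num)]
  have hn : (if a < b then ((b - a + 12 - 1) / 12).toNat else 0)
      = (if a + 12 < b then ((b - (a + 12) + 12 - 1) / 12).toNat else 0) + 1 := by
    split_ifs <;> omega
  rw [hn, List.range_succ_eq_map]
  simp only [List.map_cons, List.map_map]
  congr 1
  · push_cast; ring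
  · apply List.map_congr_left
    intro k _
    simp only [Function.comp_apply]
    push_cast; ring

-- loop invariant: the scan from c produces exactly the step-12 range starting at
-- the first year ≥ c congruent to birth_year mod 12
theorem calcLoopA_eq (end_year birth_year : Int) :
    ∀ (n : Nat) (c : Int) (acc : List Int), (end_year + 1 - c).toNat = n →
      calcLoopA end_year birth_year c acc
        = acc ++ PySem.List.pyRange (c + (birth_year - c) % 12) (end_year + 1) 12 := by
  intro n
  induction n with
  | zero =>
    intro c acc hc
    rw [calcLoopA, if_neg (by omega), pyRange12_nil (by have := Int.emod_nonneg (birth_year - c) (by norm_num : (12:Int) ≠ 0); omega)]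
    simp
  | succ n ih =>
    intro c acc hc
    rw [calcLoopA, if_pos (by omega), ih (c + 1) _ (by omega)]
    have h12 := Int.emod_nonneg (birth_year - c) (by norm_num : (12:Int) ≠ 0)
    have h12' := Int.emod_lt_of_pos (birth_year - c) (by norm_num : (0:Int) < 12)
    by_cases hm : (birth_year - c) % 12 = 0
    · rw [if_pos (by rw [pymod_eq_emod]; omega)]
      have hstep : (c + 1) + (birth_year - (c + 1)) % 12 = c + 12 := by omega
      rw [hstep, List.append_assoc]
      congr 1
      rw [show c + (birth_year - c) % 12 = c from by omega]
      conv_rhs => rw [pyRange12_cons (show c < end_year + 1 by omega)]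
      simp [hm]
    · rw [if_neg (by rw [pymod_eq_emod]; omega)]
      have hstep : (c + 1) + (birth_year - (c + 1)) % 12 = c + (birth_year - c) % 12 := by
        omega
      rw [hstep]

-- ===== VERDICT (by name: the statement is the Claim_ definition above) =====
theorem calculate_benmingnian_spec : Claim_equal_calculate_benmingnian := by
  intro s e b _
  unfold Spec_calculate_benmingnian calculate_benmingnian calculate_benmingnian_alt
  rw [calcLoopA_eq e b (e + 1 - s).toNat s [] rfl, pymod_eq_emod]
  simp
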